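-- pv_equiv track=rewrite | github.com/nicocadart/nlp_subtitles | named_entities_features.py | filter_ne_interj
-- ===== SOURCE A (Python) =====
-- def filter_ne_interj(pos_tags, named_entities, null_ne='O', neighborhood=(-2,2)):
--     """ Return list of named entities that are in the neighborhood of an interjection"""
--     ne_interj = []
--     n_tokens = len(pos_tags)
--     # loop over all named entities
--     for i_token, token in enumerate(named_entities[:-1]):
--         word, ne_tag = token
--         # if current token is a named entity
--         if ne_tag != null_ne:
--             # extract pos tags neighborhood
--             min_neighbor_id = max(0, i_token+neighborhood[0])
--             max_neighbor_id = min(n_tokens-1, i_token+neighborhood[1])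
--             neighbors_pos = {pos for _, pos in pos_tags[min_neighbor_id:max_neighbor_id+1]}
--             # if interjection in neighborhood
--             if 'UH' in neighbors_pos:
--                 ne_interj.append(word)
--     return ne_interj
-- ===== SOURCE B (Python) =====
-- def filter_ne_interj(pos_tags, named_entities, null_ne='O', neighborhood=(-2, 2)):
--     """Invert the traversal: collect interjection positions once, then one pass over entities."""
--     uh_positions = [j for j, (_, pos) in enumerate(pos_tags) if pos == 'UH']
--     ne_interj = []
--     for i_token, (word, ne_tag) in enumerate(named_entities[:-1]):
--         if ne_tag != null_ne and any(i_token + neighborhood[0] <= j <= i_token + neighborhood[1]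
--                                      for j in uh_positions):
--             ne_interj.append(word)
--     return ne_interj
-- ===== Notes on version B (the rewrite author's own statement) =====
-- stated objective: alternative
-- what changed: B inverts the traversal: it collects the interjection positions of pos_tags once and tests each named entity's index against the neighborhood interval arithmetically, instead of slicing pos_tags and building a set of POS tags for every entity.
-- intended difference: On inputs where some named entity at index i has i+neighborhood[1] <= -2 and an interjection lies in the wrapped window, A's negative slice stop wraps around the end of pos_tags and A returns that entity's word; B omits it, which is the intended empty-neighborhood reading. — e.g. on filter_ne_interj([("oh", "UH"), ("x", "NN")], [("w", "PER"), ("z", "O")], "O", (-3, -2)): A returns ["w"], B returns []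
import Mathlib
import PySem

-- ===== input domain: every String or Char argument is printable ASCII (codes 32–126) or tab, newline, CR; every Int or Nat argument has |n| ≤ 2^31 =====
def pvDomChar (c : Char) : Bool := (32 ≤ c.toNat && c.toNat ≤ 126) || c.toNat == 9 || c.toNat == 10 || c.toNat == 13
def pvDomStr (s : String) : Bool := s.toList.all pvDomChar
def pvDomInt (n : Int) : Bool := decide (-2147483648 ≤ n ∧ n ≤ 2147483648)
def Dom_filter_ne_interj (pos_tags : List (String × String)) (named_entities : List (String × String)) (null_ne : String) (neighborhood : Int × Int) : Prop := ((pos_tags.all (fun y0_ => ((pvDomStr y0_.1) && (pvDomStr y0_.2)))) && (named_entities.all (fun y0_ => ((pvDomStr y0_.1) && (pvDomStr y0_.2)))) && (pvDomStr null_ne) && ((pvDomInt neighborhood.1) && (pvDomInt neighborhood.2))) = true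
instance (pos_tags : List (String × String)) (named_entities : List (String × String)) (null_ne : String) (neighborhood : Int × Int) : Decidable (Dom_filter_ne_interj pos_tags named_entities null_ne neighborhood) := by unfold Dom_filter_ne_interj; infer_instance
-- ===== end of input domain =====

-- B inverts the traversal: it collects the interjection positions of pos_tags once and tests each
-- named entity's index against the interval directly, instead of slicing pos_tags and building a
-- set of POS tags for every entity (objective: alternative decomposition, typically faster).
-- On inputs where neighborhood[1] <= -2 reaches i_token+neighborhood[1] <= -2, A's slice stop index
-- goes negative and Python wraps it around the end of pos_tags; B treats the (empty) window as
-- intended — see D_filter_ne_interj below.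

-- ===== PORT A =====
def filter_ne_interj (pos_tags : List (String × String)) (named_entities : List (String × String)) (null_ne : String) (neighborhood : Int × Int) : List String :=
  let n_tokens : Int := (pos_tags.length : Int)
  (PySem.List.enumerate (PySem.List.slice named_entities none (some (-1))) 0).foldl
    (fun ne_interj tok =>
      let i_token := tok.1
      let word := tok.2.1
      let ne_tag := tok.2.2
      if ne_tag != null_ne then
        let min_neighbor_id : Int := max 0 (i_token + neighborhood.1)
        let max_neighbor_id : Int := min (n_tokens - 1) (i_token + neighborhood.2)
        let neighbors_pos : PySem.Set String :=
          PySem.Set.ofList ((PySem.List.slice pos_tags (some min_neighbor_id) (some (max_neighbor_id + 1))).map (fun q => q.2))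
        if neighbors_pos.contains "UH" then ne_interj ++ [word] else ne_interj
      else ne_interj) []

-- ===== PORT B =====
def filter_ne_interj_alt (pos_tags : List (String × String)) (named_entities : List (String × String)) (null_ne : String) (neighborhood : Int × Int) : List String :=
  let uh_positions : List Int :=
    ((PySem.List.enumerate pos_tags 0).filter (fun p => p.2.2 == "UH")).map (fun p => p.1)
  (PySem.List.enumerate (PySem.List.slice named_entities none (some (-1))) 0).foldl
    (fun ne_interj tok =>
      if tok.2.2 != null_ne &&
         uh_positions.any (fun j => decide (tok.1 + neighborhood.1 ≤ j) && decide (j ≤ tok.1 + neighborhood.2))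
      then ne_interj ++ [tok.2.1] else ne_interj) []

-- ===== PRECONDITION & SPEC =====
-- On inputs where some named entity at index i has i+neighborhood[1] <= -2 and an interjection sits in
-- the wrapped-around window, A's negative slice stop wraps to the end of pos_tags and A returns that
-- entity's word although its intended (empty) neighborhood holds no interjection; B omits it, which is
-- the intended reading of 'neighborhood'.
def D_filter_ne_interj (pos_tags : List (String × String)) (named_entities : List (String × String)) (null_ne : String) (neighborhood : Int × Int) : Prop :=
  ∃ e ∈ named_entities.dropLast.zipIdx, e.1.2 ≠ null_ne ∧ neighborhood.2 + e.2 ≤ -2 ∧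
    "UH" ∈ ((pos_tags.take (pos_tags.length + e.2 + neighborhood.2 + 1).toNat).drop
      (neighborhood.1 + e.2).toNat).map Prod.snd
instance (pos_tags : List (String × String)) (named_entities : List (String × String)) (null_ne : String) (neighborhood : Int × Int) : Decidable (D_filter_ne_interj pos_tags named_entities null_ne neighborhood) := by unfold D_filter_ne_interj; infer_instance

def Spec_filter_ne_interj (pos_tags : List (String × String)) (named_entities : List (String × String)) (null_ne : String) (neighborhood : Int × Int) (out : List String) : Prop := ¬ D_filter_ne_interj pos_tags named_entities null_ne neighborhood → out = filter_ne_interj_alt pos_tags named_entities null_ne neighborhood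
instance (pos_tags : List (String × String)) (named_entities : List (String × String)) (null_ne : String) (neighborhood : Int × Int) (out : List String) : Decidable (Spec_filter_ne_interj pos_tags named_entities null_ne neighborhood out) := by unfold Spec_filter_ne_interj; infer_instance

def pvDiffWitness_filter_ne_interj : (List (String × String)) × (List (String × String)) × String × (Int × Int) :=
  ([("oh", "UH"), ("x", "NN")], [("w", "PER"), ("z", "O")], "O", (-3, -2))
def pvDiffWitnessOut_filter_ne_interj : (List String) × (List String) := (["w"], [])

-- ===== CLAIM (what is proved, stated in full; the proofs are below) =====
def Claim_unchanged_filter_ne_interj : Prop := ∀ (pos_tags : List (String × String)) (named_entities : List (String × String)) (null_ne : String) (neighborhood : Int × Int), Dom_filter_ne_interj pos_tags named_entities null_ne neighborhood → Spec_filter_ne_interj pos_tags named_entities null_ne neighborhood (filter_ne_interj pos_tags named_entities null_ne neighborhood)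
def Claim_changed_filter_ne_interj : Prop := Dom_filter_ne_interj (pvDiffWitness_filter_ne_interj.1) (pvDiffWitness_filter_ne_interj.2.1) (pvDiffWitness_filter_ne_interj.2.2.1) (pvDiffWitness_filter_ne_interj.2.2.2) ∧ D_filter_ne_interj (pvDiffWitness_filter_ne_interj.1) (pvDiffWitness_filter_ne_interj.2.1) (pvDiffWitness_filter_ne_interj.2.2.1) (pvDiffWitness_filter_ne_interj.2.2.2) ∧ filter_ne_interj (pvDiffWitness_filter_ne_interj.1) (pvDiffWitness_filter_ne_interj.2.1) (pvDiffWitness_filter_ne_interj.2.2.1) (pvDiffWitness_filter_ne_interj.2.2.2) = pvDiffWitnessOut_filter_ne_interj.1 ∧ filter_ne_interj_alt (pvDiffWitness_filter_ne_interj.1) (pvDiffWitness_filter_ne_interj.2.1) (pvDiffWitness_filter_ne_interj.2.2.1) (pvDiffWitness_filter_ne_interj.2.2.2) = pvDiffWitnessOut_filter_ne_interj.2 ∧ pvDiffWitnessOut_filter_ne_interj.1 ≠ pvDiffWitnessOut_filter_ne_interj.2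
def Claim_exact_filter_ne_interj : Prop := ∀ (pos_tags : List (String × String)) (named_entities : List (String × String)) (null_ne : String) (neighborhood : Int × Int), Dom_filter_ne_interj pos_tags named_entities null_ne neighborhood → D_filter_ne_interj pos_tags named_entities null_ne neighborhood → filter_ne_interj pos_tags named_entities null_ne neighborhood ≠ filter_ne_interj_alt pos_tags named_entities null_ne neighborhood

-- ===== LEMMAS AND PROOFS =====

lemma pv_mem_take_drop {α : Type} (xs : List α) (a t : Nat) (x : α) :
    x ∈ (xs.drop a).take t ↔ ∃ j : Nat, ∃ _ : j < xs.length, a ≤ j ∧ j < a + t ∧ xs[j] = x := by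
  rw [List.mem_iff_getElem]
  constructor
  · rintro ⟨k, hk, hx⟩
    have hk' : k < t ∧ k < xs.length - a := by
      simp only [List.length_take, List.length_drop] at hk; omega
    rw [List.getElem_take, List.getElem_drop] at hx
    exact ⟨a + k, by omega, by omega, by omega, hx⟩
  · rintro ⟨j, hj, haj, hjt, hx⟩
    refine ⟨j - a, by simp only [List.length_take, List.length_drop]; omega, ?_⟩
    rw [List.getElem_take, List.getElem_drop]
    convert hx using 2
    omega

lemma pv_mem_drop_take {α : Type} (xs : List α) (t a : Nat) (x : α) :
    x ∈ (xs.take t).drop a ↔ ∃ j : Nat, ∃ _ : j < xs.length, a ≤ j ∧ j < t ∧ xs[j] = x := by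
  rw [List.mem_iff_getElem]
  constructor
  · rintro ⟨k, hk, hx⟩
    have hk' : a + k < t ∧ a + k < xs.length := by
      simp only [List.length_drop, List.length_take] at hk; omega
    rw [List.getElem_drop, List.getElem_take] at hx
    exact ⟨a + k, by omega, by omega, by omega, hx⟩
  · rintro ⟨j, hj, haj, hjt, hx⟩
    refine ⟨j - a, by simp only [List.length_drop, List.length_take]; omega, ?_⟩
    rw [List.getElem_drop, List.getElem_take]
    convert hx using 2
    omega

-- the change region, re-stated with explicit indices (the form the proofs use)
lemma pv_D_iff (pos_tags : List (String × String)) (named_entities : List (String × String)) (null_ne : String) (neighborhood : Int × Int) :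
    D_filter_ne_interj pos_tags named_entities null_ne neighborhood ↔
      ∃ k : Nat, ∃ _ : k < named_entities.dropLast.length,
        (named_entities.dropLast[k]).2 ≠ null_ne ∧ (k : Int) + neighborhood.2 ≤ -2 ∧
        ∃ j : Nat, ∃ _ : j < pos_tags.length, (pos_tags[j]).2 = "UH" ∧
          max 0 ((k : Int) + neighborhood.1) ≤ (j : Int) ∧
          (j : Int) ≤ (pos_tags.length : Int) + (k : Int) + neighborhood.2 := by
  unfold D_filter_ne_interj
  constructor
  · rintro ⟨e, he, h1, h2, h3⟩
    rw [List.mem_zipIdx_iff_getElem?, List.getElem?_eq_some_iff] at he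
    obtain ⟨hk, heq⟩ := he
    rw [List.mem_map] at h3
    obtain ⟨q, hq, hsnd⟩ := h3
    rw [pv_mem_drop_take] at hq
    obtain ⟨j, hj, haj, hjt, hx⟩ := hq
    refine ⟨e.2, hk, by rw [heq]; exact h1, by omega, j, hj, by rw [hx]; exact hsnd, by omega, by omega⟩
  · rintro ⟨k, hk, h1, h2, j, hj, hUH, hja, hjb⟩
    refine ⟨(named_entities.dropLast[k], k), ?_, h1, by omega, ?_⟩
    · rw [List.mem_zipIdx_iff_getElem?, List.getElem?_eq_some_iff]
      exact ⟨hk, rfl⟩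
    · rw [List.mem_map]
      refine ⟨pos_tags[j], ?_, hUH⟩
      rw [pv_mem_drop_take]
      exact ⟨j, hj, by omega, by omega, rfl⟩

lemma pv_mem_slice_iff {α : Type} (xs : List α) (lo hi : Int) (h0 : 0 ≤ lo) (x : α) :
    x ∈ PySem.List.slice xs (some lo) (some hi) ↔
      ∃ j : Nat, ∃ _ : j < xs.length, lo ≤ (j : Int) ∧
        ((j : Int) < if 0 ≤ hi then hi else (xs.length : Int) + hi) ∧ xs[j] = x := by
  have hA : ((PySem.List.clampIdx xs.length lo : Nat) : Int) = min lo (xs.length : Int) := by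
    simp only [PySem.List.clampIdx]; split_ifs <;> push_cast <;> omega
  have hB : ((PySem.List.clampIdx xs.length hi : Nat) : Int)
      = if 0 ≤ hi then min hi (xs.length : Int) else max 0 ((xs.length : Int) + hi) := by
    simp only [PySem.List.clampIdx]; split_ifs <;> push_cast <;> omega
  simp only [PySem.List.slice]
  rw [pv_mem_take_drop]
  by_cases h : 0 ≤ hi
  · simp only [h, if_true] at hB ⊢
    constructor
    · rintro ⟨j, hj, h1, h2, hx⟩; exact ⟨j, hj, by omega, by omega, hx⟩
    · rintro ⟨j, hj, h1, h2, hx⟩; exact ⟨j, hj, by omega, by omega, hx⟩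
  · simp only [h, if_false] at hB ⊢
    constructor
    · rintro ⟨j, hj, h1, h2, hx⟩; exact ⟨j, hj, by omega, by omega, hx⟩
    · rintro ⟨j, hj, h1, h2, hx⟩; exact ⟨j, hj, by omega, by omega, hx⟩

lemma pv_condA_iff (pos_tags : List (String × String)) (a b i : Int) :
    ((PySem.Set.ofList ((PySem.List.slice pos_tags (some (max 0 (i + a))) (some (min ((pos_tags.length : Int) - 1) (i + b) + 1))).map (fun q => q.2))).contains "UH") = true ↔
      ∃ j : Nat, ∃ _ : j < pos_tags.length, (pos_tags[j]).2 = "UH" ∧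
        max 0 (i + a) ≤ (j : Int) ∧
        ((j : Int) ≤ i + b ∨ (i + b ≤ -2 ∧ (j : Int) ≤ (pos_tags.length : Int) + i + b)) := by
  rw [PySem.Set.contains_iff, PySem.Set.mem_ofList, List.mem_map]
  constructor
  · rintro ⟨q, hq, hq2⟩
    rw [pv_mem_slice_iff _ _ _ (le_max_left 0 _)] at hq
    obtain ⟨j, hj, h1, h2, hx⟩ := hq
    refine ⟨j, hj, by rw [hx]; exact hq2, h1, ?_⟩
    split_ifs at h2 <;> omega
  · rintro ⟨j, hj, hUH, h1, h2⟩
    refine ⟨pos_tags[j], ?_, hUH⟩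
    rw [pv_mem_slice_iff _ _ _ (le_max_left 0 _)]
    exact ⟨j, hj, h1, by split_ifs <;> omega, rfl⟩

lemma pv_condB_iff (pos_tags : List (String × String)) (a b i : Int) :
    ((((PySem.List.enumerate pos_tags 0).filter (fun p => p.2.2 == "UH")).map (fun p => p.1)).any
        (fun j => decide (i + a ≤ j) && decide (j ≤ i + b))) = true ↔
      ∃ j : Nat, ∃ _ : j < pos_tags.length, (pos_tags[j]).2 = "UH" ∧ i + a ≤ (j : Int) ∧ (j : Int) ≤ i + b := by
  simp only [List.any_eq_true, List.mem_map, List.mem_filter, PySem.List.mem_enumerate_iff,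
    Bool.and_eq_true, decide_eq_true_eq, beq_iff_eq, zero_add]
  constructor
  · rintro ⟨x, ⟨p, ⟨⟨k, hk, rfl⟩, hUH⟩, rfl⟩, h1, h2⟩
    exact ⟨k, hk, hUH, h1, h2⟩
  · rintro ⟨j, hj, hUH, h1, h2⟩
    exact ⟨(j : Int), ⟨((j : Int), pos_tags[j]), ⟨⟨j, hj, rfl⟩, hUH⟩, rfl⟩, h1, h2⟩

lemma pv_countP_lt {α : Type} (p q : α → Bool) (l : List α) (h : ∀ x ∈ l, p x = true → q x = true)
    (a : α) (ha : a ∈ l) (hqa : q a = true) (hpa : p a = false) : l.countP p < l.countP q := by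
  obtain ⟨s, t, rfl⟩ := List.append_of_mem ha
  rw [List.countP_append, List.countP_append, List.countP_cons, List.countP_cons, hqa, hpa]
  have hs := List.countP_mono_left (p := p) (q := q) (l := s) (fun x hx => h x (by simp [hx]))
  have ht := List.countP_mono_left (p := p) (q := q) (l := t) (fun x hx => h x (by simp [hx]))
  simp only [Bool.false_eq_true, if_false, if_true]
  omega


-- ===== VERDICT (by name: the statement is the Claim_ definition above) =====
theorem filter_ne_interj_spec : Claim_unchanged_filter_ne_interj := by
  intro pos nes null nb _ hD
  unfold filter_ne_interj filter_ne_interj_alt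
  simp only [PySem.List.slice_to_neg_one]
  refine PySem.List.foldl_congr_mem' _ _ _ _ ?_
  intro tok htok acc
  rw [PySem.List.mem_enumerate_iff] at htok
  obtain ⟨k, hk, rfl⟩ := htok
  simp only [zero_add, List.getElem_dropLast]
  by_cases heq : (nes[k]'(by have := nes.length_dropLast; omega)).2 = null
  · simp [heq]
  · have hne : ((nes[k]'(by have := nes.length_dropLast; omega)).2 != null) = true := by simp [bne, heq]
    simp only [hne, Bool.true_and, if_true]
    have hcond :
        ((PySem.Set.ofList ((PySem.List.slice pos (some (max 0 ((k:Int) + nb.1))) (some (min ((pos.length : Int) - 1) ((k:Int) + nb.2) + 1))).map (fun q => q.2))).contains "UH")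
        = (((PySem.List.enumerate pos 0).filter (fun p => p.2.2 == "UH")).map (fun p => p.1)).any
            (fun j => decide ((k:Int) + nb.1 ≤ j) && decide (j ≤ (k:Int) + nb.2)) := by
      rw [Bool.eq_iff_iff, pv_condA_iff pos nb.1 nb.2 (k:Int), pv_condB_iff]
      constructor
      · rintro ⟨j, hj, hUH, h1, h2 | ⟨hb2, h3⟩⟩
        · exact ⟨j, hj, hUH, by omega, h2⟩
        · exfalso
          apply hD
          rw [pv_D_iff]
          refine ⟨k, hk, ?_, hb2, j, hj, hUH, h1, by omega⟩
          simpa using heq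
      · rintro ⟨j, hj, hUH, h1, h2⟩
        exact ⟨j, hj, hUH, by omega, Or.inl h2⟩
    rw [hcond]

theorem filter_ne_interj_changed : Claim_changed_filter_ne_interj := by
  unfold Claim_changed_filter_ne_interj; decide

theorem filter_ne_interj_tight : Claim_exact_filter_ne_interj := by
  intro pos nes null nb _ hDyes hEq
  rw [pv_D_iff] at hDyes
  obtain ⟨k, hk, hne, hb2, j, hj, hUH, hja, hjb⟩ := hDyes
  have hA : filter_ne_interj pos nes null nb =
      ((PySem.List.enumerate nes.dropLast 0).filter
        (fun tok => tok.2.2 != null &&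
          (PySem.Set.ofList ((PySem.List.slice pos (some (max 0 (tok.1 + nb.1))) (some (min ((pos.length : Int) - 1) (tok.1 + nb.2) + 1))).map (fun q => q.2))).contains "UH")).map
        (fun tok => tok.2.1) := by
    unfold filter_ne_interj
    simp only [PySem.List.slice_to_neg_one]
    rw [PySem.List.foldl_congr_mem' _ _
      (fun acc tok => if (tok.2.2 != null &&
          (PySem.Set.ofList ((PySem.List.slice pos (some (max 0 (tok.1 + nb.1))) (some (min ((pos.length : Int) - 1) (tok.1 + nb.2) + 1))).map (fun q => q.2))).contains "UH") = true
        then acc ++ [tok.2.1] else acc) []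
      (by
        intro tok _ acc
        split_ifs <;> simp_all)]
    rw [PySem.List.foldl_append_if]
    simp
  have hB : filter_ne_interj_alt pos nes null nb =
      ((PySem.List.enumerate nes.dropLast 0).filter
        (fun tok => tok.2.2 != null &&
          ((((PySem.List.enumerate pos 0).filter (fun p => p.2.2 == "UH")).map (fun p => p.1)).any
            (fun j => decide (tok.1 + nb.1 ≤ j) && decide (j ≤ tok.1 + nb.2))))).map
        (fun tok => tok.2.1) := by
    unfold filter_ne_interj_alt
    simp only [PySem.List.slice_to_neg_one]
    rw [PySem.List.foldl_append_if]
    simp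
  rw [hA, hB] at hEq
  have hlen := congrArg List.length hEq
  simp only [List.length_map, ← List.countP_eq_length_filter] at hlen
  have hlt : (PySem.List.enumerate nes.dropLast 0).countP
      (fun tok => tok.2.2 != null &&
          ((((PySem.List.enumerate pos 0).filter (fun p => p.2.2 == "UH")).map (fun p => p.1)).any
            (fun j => decide (tok.1 + nb.1 ≤ j) && decide (j ≤ tok.1 + nb.2)))) <
      (PySem.List.enumerate nes.dropLast 0).countP
      (fun tok => tok.2.2 != null &&
          (PySem.Set.ofList ((PySem.List.slice pos (some (max 0 (tok.1 + nb.1))) (some (min ((pos.length : Int) - 1) (tok.1 + nb.2) + 1))).map (fun q => q.2))).contains "UH") := by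
    apply pv_countP_lt _ _ _ ?mono ((k : Int), nes.dropLast[k]) ?mem ?qa ?pa
    case mono =>
      rintro tok htok hpB
      rw [PySem.List.mem_enumerate_iff] at htok
      obtain ⟨k', hk', rfl⟩ := htok
      simp only [zero_add] at hpB ⊢
      rw [Bool.and_eq_true] at hpB ⊢
      refine ⟨hpB.1, ?_⟩
      rw [pv_condB_iff] at hpB
      obtain ⟨j', hj', hUH', h1, h2⟩ := hpB.2
      rw [pv_condA_iff _ _ _ _]
      exact ⟨j', hj', hUH', by omega, Or.inl h2⟩
    case mem =>
      rw [PySem.List.mem_enumerate_iff]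
      exact ⟨k, hk, by simp⟩
    case qa =>
      rw [Bool.and_eq_true]
      refine ⟨by simpa [bne] using hne, ?_⟩
      rw [pv_condA_iff _ _ _ _]
      exact ⟨j, hj, by simpa using hUH, hja, Or.inr ⟨hb2, by push_cast; omega⟩⟩
    case pa =>
      rw [Bool.eq_false_iff]
      intro hpB
      rw [Bool.and_eq_true, pv_condB_iff] at hpB
      obtain ⟨j', hj', _, h1, h2⟩ := hpB.2
      omega
  omega
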